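-- pv_equiv track=rewrite | github.com/mregungor/2024-YZ-VOST-LiRH | 2118121039/2118121039-FinalRaporu-Mustafa Aker/Yapılan Diğer çalışmalar/Genetik algoritma DersProgram-1.py | siralama_yap
-- ===== SOURCE A (Python) =====
-- def siralama_yap(birListe, birListe2):
--     for numPasada in range(len(birListe) - 1, 0, -1):
--         for i in range(numPasada):
--             if birListe[i] > birListe[i + 1]:
--                 temp = birListe[i]
--                 temp2 = birListe2[i]
--                 birListe[i] = birListe[i + 1]
--                 birListe2[i] = birListe2[i + 1]
--                 birListe[i + 1] = temp
--                 birListe2[i + 1] = temp2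
--
--     return (birListe, birListe2)
-- ===== SOURCE B (Python) =====
-- def siralama_yap(birListe, birListe2):
--     n = len(birListe)
--     # stable sort of the decorated first list; ties keep original order via the index
--     dec = sorted(enumerate(birListe), key=lambda t: (t[1], t[0]))
--     birListe[:] = [v for _, v in dec]
--     birListe2[:n] = [birListe2[i] for i, _ in dec]
--     return (birListe, birListe2)
-- ===== Notes on version B (the rewrite author's own statement) =====
-- stated objective: faster
-- what changed: Replaces the quadratic in-place bubble sort of the two parallel lists by one stable Timsort call on the index-decorated first list, after which both lists are rebuilt by that single permutation.
-- outside the precondition, e.g. on siralama_yap([1, 2], []): A returns ([1, 2], []), B raises IndexError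
import Mathlib
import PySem

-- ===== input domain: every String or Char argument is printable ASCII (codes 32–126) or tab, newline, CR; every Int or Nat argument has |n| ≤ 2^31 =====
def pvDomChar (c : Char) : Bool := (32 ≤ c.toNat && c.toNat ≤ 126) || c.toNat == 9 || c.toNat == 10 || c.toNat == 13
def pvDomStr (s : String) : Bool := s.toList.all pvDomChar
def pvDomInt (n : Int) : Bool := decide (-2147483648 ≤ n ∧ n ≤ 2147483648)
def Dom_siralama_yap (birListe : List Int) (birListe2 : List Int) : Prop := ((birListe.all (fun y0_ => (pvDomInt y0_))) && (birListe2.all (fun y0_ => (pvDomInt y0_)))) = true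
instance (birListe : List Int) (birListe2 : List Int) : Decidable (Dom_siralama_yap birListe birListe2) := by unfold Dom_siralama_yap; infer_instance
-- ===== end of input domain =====

-- B replaces A's in-place parallel bubble sort by ONE stable sort of the index-decorated
-- first list, then rebuilds both lists along that permutation (O(n log n) vs O(n^2)).
-- Both Pythons mutate their list arguments in place; the theorems here are about the
-- return value (which is those same two lists).

-- ===== PORT A =====
-- inner-loop body: if birListe[i] > birListe[i+1]: swap positions i, i+1 in both lists
-- (pyGetD/pySetD are the total forms; exact under Pre_, where every touched index is in range)
def pvStepA (st : List Int × List Int) (i : Int) : List Int × List Int :=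
  if PySem.List.pyGetD st.1 (i + 1) 0 < PySem.List.pyGetD st.1 i 0 then
    let temp := PySem.List.pyGetD st.1 i 0
    let temp2 := PySem.List.pyGetD st.2 i 0
    let a := PySem.List.pySetD st.1 i (PySem.List.pyGetD st.1 (i + 1) 0)
    let b := PySem.List.pySetD st.2 i (PySem.List.pyGetD st.2 (i + 1) 0)
    (PySem.List.pySetD a (i + 1) temp, PySem.List.pySetD b (i + 1) temp2)
  else st

def siralama_yap (birListe : List Int) (birListe2 : List Int) : List Int × List Int :=
  (PySem.List.pyRange ((birListe.length : Int) - 1) 0 (-1)).foldl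
    (fun st numPasada => (PySem.List.pyRange 0 numPasada 1).foldl pvStepA st)
    (birListe, birListe2)

-- ===== PORT B =====
-- key=lambda t: (t[1], t[0]) — a tuple key on totally ordered components: lexicographic, = toLex
def siralama_yap_alt (birListe : List Int) (birListe2 : List Int) : List Int × List Int :=
  let n : Int := birListe.length
  let dec := PySem.List.sorted (PySem.List.enumerate birListe 0) (fun t => toLex (t.2, t.1)) false
  (dec.map (fun t => t.2),
   dec.map (fun t => PySem.List.pyGetD birListe2 t.1 0) ++ PySem.List.slice birListe2 (some n) none)

-- ===== PRECONDITION & SPEC =====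
-- Pre_ excludes inputs where birListe2 is shorter than birListe: there A indexes birListe2 only
-- when it actually swaps (so it returns on already-sorted data but raises IndexError otherwise),
-- while B's rebuild always raises IndexError on such inputs.
def Pre_siralama_yap (birListe : List Int) (birListe2 : List Int) : Prop :=
  birListe.length ≤ birListe2.length
instance (birListe : List Int) (birListe2 : List Int) : Decidable (Pre_siralama_yap birListe birListe2) := by unfold Pre_siralama_yap; infer_instance

def pvWitness_siralama_yap : List Int × List Int := ([3, 1, 2], [10, 20, 30])

def Spec_siralama_yap (birListe : List Int) (birListe2 : List Int) (out : List Int × List Int) : Prop := out = siralama_yap_alt birListe birListe2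
instance (birListe : List Int) (birListe2 : List Int) (out : List Int × List Int) : Decidable (Spec_siralama_yap birListe birListe2 out) := by unfold Spec_siralama_yap; infer_instance

-- ===== CLAIM (what is proved, stated in full; the proofs are below) =====
def Claim_equal_siralama_yap : Prop := ∀ (birListe : List Int) (birListe2 : List Int), Dom_siralama_yap birListe birListe2 → Pre_siralama_yap birListe birListe2 → Spec_siralama_yap birListe birListe2 (siralama_yap birListe birListe2)

-- ===== LEMMAS AND PROOFS =====

-- decorated elements: (original index, value), as produced by enumerate
-- the sort key of B, named
def pvKey (t : Int × Int) : Int ×ₗ Int := toLex (t.2, t.1)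

-- strict order by key, and the stability relation (equal values ⇒ indices in order)
def pvKlt (a b : Int × Int) : Prop := pvKey a < pvKey b
def pvS (a b : Int × Int) : Prop := a.2 = b.2 → a.1 < b.1

-- one full bubble pass on a decorated list
def pvPass : List (Int × Int) → List (Int × Int)
  | [] => []
  | [x] => [x]
  | x :: y :: t => if y.2 < x.2 then y :: pvPass (x :: t) else x :: pvPass (y :: t)

-- a bubble pass limited to the first m+1 positions (m compare-swaps)
def pvPassB : Nat → List (Int × Int) → List (Int × Int)
  | 0, l => l
  | _ + 1, [] => []
  | _ + 1, [x] => [x]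
  | m + 1, x :: y :: t => if y.2 < x.2 then y :: pvPassB m (x :: t) else x :: pvPassB m (y :: t)

-- the outer loop: passes limited to m, m-1, ..., 1
def pvBub : Nat → List (Int × Int) → List (Int × Int)
  | 0, l => l
  | m + 1, l => pvBub m (pvPassB (m + 1) l)

-- Nat-indexed compare-swap on the decorated list (the inner-loop body, abstractly)
def pvStepD (d : List (Int × Int)) (i : Nat) : List (Int × Int) :=
  if h : i + 1 < d.length then
    if (d[i + 1]'h).2 < (d[i]'(by omega)).2 then
      (d.set i (d[i + 1]'h)).set (i + 1) (d[i]'(by omega))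
    else d
  else d

def pvInnerN (m : Nat) (d : List (Int × Int)) : List (Int × Int) :=
  (List.range m).foldl pvStepD d

-- the simulation map: a decorated list to the pair of real lists
def pvT (l2 : List Int) (d : List (Int × Int)) : List Int × List Int :=
  (d.map (fun t => t.2),
   d.map (fun t => PySem.List.pyGetD l2 t.1 0) ++ l2.drop d.length)

theorem pvStepD_length (d : List (Int × Int)) (i : Nat) : (pvStepD d i).length = d.length := by
  unfold pvStepD; split <;> [skip; rfl]; split <;> simp

theorem pvInnerN_length (m : Nat) (d : List (Int × Int)) : (pvInnerN m d).length = d.length := by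
  induction m generalizing d with
  | zero => rfl
  | succ m ih =>
    unfold pvInnerN
    rw [List.range_succ, List.foldl_append]
    simp only [List.foldl_cons, List.foldl_nil]
    rw [pvStepD_length]; exact ih d

theorem pvStepD_cons_succ (x : Int × Int) (d : List (Int × Int)) (i : Nat) :
    pvStepD (x :: d) (i + 1) = x :: pvStepD d i := by
  unfold pvStepD
  by_cases h : i + 1 < d.length
  · have h' : i + 1 + 1 < (x :: d).length := by simp; omega
    rw [dif_pos h, dif_pos h']
    simp only [List.getElem_cons_succ, List.set_cons_succ]
    split <;> rfl
  · have h' : ¬ (i + 1 + 1 < (x :: d).length) := by simp; omega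
    rw [dif_neg h, dif_neg h']

theorem pvStepD_nil (i : Nat) : pvStepD [] i = [] := by
  unfold pvStepD; rw [dif_neg (by simp)]

theorem pvStepD_single (x : Int × Int) (i : Nat) : pvStepD [x] i = [x] := by
  unfold pvStepD; rw [dif_neg (by simp only [List.length_singleton]; omega)]

theorem pvFoldl_stepD_nil (is : List Nat) : is.foldl pvStepD [] = [] := by
  induction is with
  | nil => rfl
  | cons i is ih => simp only [List.foldl_cons, pvStepD_nil]; exact ih

theorem pvFoldl_stepD_single (x : Int × Int) (is : List Nat) : is.foldl pvStepD [x] = [x] := by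
  induction is with
  | nil => rfl
  | cons i is ih => simp only [List.foldl_cons, pvStepD_single]; exact ih

theorem pvFoldl_stepD_map_succ (is : List Nat) (x : Int × Int) (d : List (Int × Int)) :
    (is.map Nat.succ).foldl pvStepD (x :: d) = x :: is.foldl pvStepD d := by
  induction is generalizing d with
  | nil => rfl
  | cons i is ih =>
    simp only [List.map_cons, List.foldl_cons, Nat.succ_eq_add_one, pvStepD_cons_succ]
    exact ih _

theorem pvStepD_zero_cons (x y : Int × Int) (t : List (Int × Int)) :
    pvStepD (x :: y :: t) 0 = if y.2 < x.2 then y :: x :: t else x :: y :: t := by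
  unfold pvStepD
  rw [dif_pos (by simp only [List.length_cons]; omega)]
  rfl

theorem pvInnerN_eq_passB (m : Nat) (d : List (Int × Int)) : pvInnerN m d = pvPassB m d := by
  induction m generalizing d with
  | zero => rfl
  | succ m ih =>
    unfold pvInnerN
    rw [List.range_succ_eq_map, List.foldl_cons]
    match d with
    | [] => rw [pvStepD_nil, pvFoldl_stepD_nil]; rfl
    | [x] => rw [pvStepD_single, pvFoldl_stepD_single]; rfl
    | x :: y :: t =>
      rw [pvStepD_zero_cons]
      by_cases hc : y.2 < x.2
      · rw [if_pos hc, pvFoldl_stepD_map_succ]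
        show y :: pvInnerN m (x :: t) = pvPassB (m + 1) (x :: y :: t)
        rw [ih]
        show _ = if y.2 < x.2 then y :: pvPassB m (x :: t) else x :: pvPassB m (y :: t)
        rw [if_pos hc]
      · rw [if_neg hc, pvFoldl_stepD_map_succ]
        show x :: pvInnerN m (y :: t) = pvPassB (m + 1) (x :: y :: t)
        rw [ih]
        show _ = if y.2 < x.2 then y :: pvPassB m (x :: t) else x :: pvPassB m (y :: t)
        rw [if_neg hc]

theorem pvPassB_eq (m : Nat) (l : List (Int × Int)) :
    pvPassB m l = pvPass (l.take (m + 1)) ++ l.drop (m + 1) := by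
  induction m, l using pvPassB.induct with
  | case1 l => cases l <;> simp [pvPassB, pvPass]
  | case2 => simp [pvPassB, pvPass]
  | case3 => simp [pvPassB, pvPass]
  | case4 m x y t hc ih =>
    show (if y.2 < x.2 then y :: pvPassB m (x :: t) else x :: pvPassB m (y :: t)) = _
    rw [if_pos hc, ih]
    simp only [Nat.succ_eq_add_one, List.take_succ_cons, List.drop_succ_cons, pvPass, if_pos hc]
    rfl
  | case5 m x y t hc ih =>
    show (if y.2 < x.2 then y :: pvPassB m (x :: t) else x :: pvPassB m (y :: t)) = _
    rw [if_neg hc, ih]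
    simp only [Nat.succ_eq_add_one, List.take_succ_cons, List.drop_succ_cons, pvPass, if_neg hc]
    rfl

theorem pvPass_perm (l : List (Int × Int)) : (pvPass l).Perm l := by
  induction l using pvPass.induct with
  | case1 => simp [pvPass]
  | case2 => simp [pvPass]
  | case3 x y t hc ih =>
    rw [pvPass, if_pos hc]
    exact (ih.cons y).trans (List.Perm.swap x y t)
  | case4 x y t hc ih =>
    rw [pvPass, if_neg hc]
    exact ih.cons x

theorem pvKey_lt_iff (a b : Int × Int) : pvKey a < pvKey b ↔ a.2 < b.2 ∨ (a.2 = b.2 ∧ a.1 < b.1) := by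
  simp [pvKey, Prod.Lex.lt_iff]

theorem pvKey_le_iff (a b : Int × Int) : pvKey a ≤ pvKey b ↔ a.2 < b.2 ∨ (a.2 = b.2 ∧ a.1 ≤ b.1) := by
  simp [pvKey, Prod.Lex.le_iff]

theorem pvPass_stable (l : List (Int × Int)) (h : l.Pairwise pvS) : (pvPass l).Pairwise pvS := by
  induction l using pvPass.induct with
  | case1 => simp [pvPass]
  | case2 => simp [pvPass]
  | case3 x y t hc ih =>
    rw [pvPass, if_pos hc]
    rw [List.pairwise_cons, List.pairwise_cons] at h
    obtain ⟨hx, hy, ht⟩ := h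
    refine List.pairwise_cons.mpr ⟨?_, ih (List.pairwise_cons.mpr ⟨fun z hz => hx z (by simp [hz]), ht⟩)⟩
    intro z hz
    rcases List.mem_cons.mp ((pvPass_perm (x :: t)).mem_iff.mp hz) with rfl | hzt
    · intro he; rw [he] at hc; exact absurd hc (lt_irrefl _)
    · exact hy z hzt
  | case4 x y t hc ih =>
    rw [pvPass, if_neg hc]
    rw [List.pairwise_cons, List.pairwise_cons] at h
    obtain ⟨hx, hy, ht⟩ := h
    refine List.pairwise_cons.mpr ⟨?_, ih (List.pairwise_cons.mpr ⟨hy, ht⟩)⟩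
    intro z hz
    exact hx z (by simpa using (pvPass_perm (y :: t)).mem_iff.mp hz)

theorem pvPass_last (l : List (Int × Int)) (h : l.Pairwise pvS) (hne : l ≠ []) :
    ∃ ys M, pvPass l = ys ++ [M] ∧ (∀ x ∈ ys, pvKlt x M) ∧ (∀ x ∈ l, pvKey x ≤ pvKey M) := by
  induction l using pvPass.induct with
  | case1 => exact absurd rfl hne
  | case2 x =>
    refine ⟨[], x, by simp [pvPass], by simp, by simp⟩
  | case3 x y t hc ih =>
    rw [List.pairwise_cons] at h
    obtain ⟨hx, h'⟩ := h
    rw [List.pairwise_cons] at h'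
    obtain ⟨hy, ht⟩ := h'
    have hxt : List.Pairwise pvS (x :: t) :=
      List.pairwise_cons.mpr ⟨fun z hz => hx z (by simp [hz]), ht⟩
    obtain ⟨ys, M, heq, h1, h2⟩ := ih hxt (by simp)
    refine ⟨y :: ys, M, ?_, ?_, ?_⟩
    · rw [pvPass, if_pos hc, heq]; rfl
    · intro z hz
      rcases List.mem_cons.mp hz with rfl | hz
      · have hxM : pvKey x ≤ pvKey M := h2 x (by simp)
        rw [pvKey_le_iff] at hxM
        rw [pvKlt, pvKey_lt_iff]
        omega
      · exact h1 z hz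
    · intro z hz
      rcases List.mem_cons.mp hz with rfl | hz
      · exact h2 z (by simp)
      · rcases List.mem_cons.mp hz with rfl | hz
        · have hxM : pvKey x ≤ pvKey M := h2 x (by simp)
          rw [pvKey_le_iff] at hxM ⊢
          omega
        · exact h2 z (by simp [hz])
  | case4 x y t hc ih =>
    rw [List.pairwise_cons] at h
    obtain ⟨hx, h'⟩ := h
    obtain ⟨ys, M, heq, h1, h2⟩ := ih h' (by simp)
    have hyM : pvKey y ≤ pvKey M := h2 y (by simp)
    have hxy : pvS x y := hx y (by simp)
    have hxM : pvKlt x M := by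
      rw [pvKey_le_iff] at hyM
      rw [pvKlt, pvKey_lt_iff]
      rcases lt_or_eq_of_le (not_lt.mp hc) with hlt | he
      · omega
      · have := hxy he
        omega
    refine ⟨x :: ys, M, ?_, ?_, ?_⟩
    · rw [pvPass, if_neg hc, heq]; rfl
    · intro z hz
      rcases List.mem_cons.mp hz with rfl | hz
      · exact hxM
      · exact h1 z hz
    · intro z hz
      rcases List.mem_cons.mp hz with rfl | hz
      · exact le_of_lt hxM
      · exact h2 z hz

theorem pvBub_inv (m : Nat) (l : List (Int × Int)) (hS : l.Pairwise pvS)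
    (hb : ∀ a ∈ l.take (m + 1), ∀ b ∈ l.drop (m + 1), pvKlt a b)
    (hd : (l.drop (m + 1)).Pairwise pvKlt) :
    (pvBub m l).Perm l ∧ (pvBub m l).Pairwise pvKlt := by
  induction m generalizing l with
  | zero =>
    refine ⟨by simp [pvBub], ?_⟩
    show l.Pairwise pvKlt
    cases l with
    | nil => simp
    | cons a t =>
      refine List.pairwise_cons.mpr ⟨?_, by simpa using hd⟩
      intro b hbmem
      exact hb a (by simp) b (by simpa using hbmem)
  | succ m ih =>
    have hbub : pvBub (m + 1) l = pvBub m (pvPassB (m + 1) l) := by simp [pvBub]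
    have hb' : ∀ a ∈ l.take (m + 2), ∀ b ∈ l.drop (m + 2), pvKlt a b := hb
    have hd' : (l.drop (m + 2)).Pairwise pvKlt := hd
    set p := l.take (m + 2) with hp
    set d := l.drop (m + 2) with hdd
    have hpd : p ++ d = l := List.take_append_drop _ l
    have hl2 : pvPassB (m + 1) l = pvPass p ++ d := pvPassB_eq (m + 1) l
    have hSpd : (p ++ d).Pairwise pvS := by rw [hpd]; exact hS
    obtain ⟨Sp, Sd, cross⟩ := List.pairwise_append.mp hSpd
    have hperm2 : (pvPassB (m + 1) l).Perm l := by
      rw [hl2]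
      exact (Eq.mpr (by rw [hpd]) ((pvPass_perm p).append_right d) : (pvPass p ++ d).Perm l)
    have hS2 : (pvPassB (m + 1) l).Pairwise pvS := by
      rw [hl2]
      exact List.pairwise_append.mpr ⟨pvPass_stable p Sp, Sd,
        fun a ha b hbm => cross a ((pvPass_perm p).mem_iff.mp ha) b hbm⟩
    have hlen2 : (pvPassB (m + 1) l).length = l.length := hperm2.length_eq
    have hmain : (pvBub m (pvPassB (m + 1) l)).Perm (pvPassB (m + 1) l) ∧
        (pvBub m (pvPassB (m + 1) l)).Pairwise pvKlt := by
      by_cases hlong : m + 2 ≤ l.length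
      · have hpne : p ≠ [] := by
          apply List.ne_nil_of_length_pos
          rw [hp, List.length_take]
          omega
        obtain ⟨ys, M, heq, h1, h2⟩ := pvPass_last p Sp hpne
        have hlp : (pvPass p).length = p.length := (pvPass_perm p).length_eq
        have hlys : ys.length = m + 1 := by
          rw [heq] at hlp
          rw [List.length_append, List.length_singleton] at hlp
          rw [hp, List.length_take] at hlp
          omega
        have hl2' : pvPassB (m + 1) l = ys ++ (M :: d) := by
          rw [hl2, heq, List.append_assoc]
          rfl
        have htake : (pvPassB (m + 1) l).take (m + 1) = ys := by
          rw [hl2', ← hlys, List.take_left]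
        have hdrop : (pvPassB (m + 1) l).drop (m + 1) = M :: d := by
          rw [hl2', ← hlys, List.drop_left]
        have hMp : M ∈ p := by
          apply (pvPass_perm p).mem_iff.mp
          rw [heq]
          simp
        apply ih
        · exact hS2
        · intro a ha b hbm
          rw [htake] at ha
          rw [hdrop] at hbm
          rcases List.mem_cons.mp hbm with rfl | hbm
          · exact h1 a ha
          · have hap : a ∈ p := by
              apply (pvPass_perm p).mem_iff.mp
              rw [heq]
              exact List.mem_append_left _ ha
            exact hb' a hap b hbm
        · rw [hdrop]
          refine List.pairwise_cons.mpr ⟨fun b hbm => hb' M hMp b hbm, hd'⟩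
      · have hnil : (pvPassB (m + 1) l).drop (m + 1) = [] := by
          apply List.drop_eq_nil_of_le
          rw [hlen2]
          omega
        apply ih
        · exact hS2
        · intro a ha b hbm
          rw [hnil] at hbm
          simp at hbm
        · rw [hnil]
          simp
    rw [hbub]
    exact ⟨hmain.1.trans hperm2, hmain.2⟩

-- getD / setD on mapped (and appended) lists, at an in-range Nat index
theorem pvGetD_map {f : (Int × Int) → Int} (d : List (Int × Int))
    (j : Nat) (h : j < d.length) :
    PySem.List.pyGetD (d.map f) (j : Int) 0 = f (d[j]'h) := by
  rw [PySem.List.pyGetD_natCast, List.getD_eq_getElem _ _ (by simpa using h), List.getElem_map]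

theorem pvGetD_map_append {f : (Int × Int) → Int} (d : List (Int × Int)) (r : List Int)
    (j : Nat) (h : j < d.length) :
    PySem.List.pyGetD (d.map f ++ r) (j : Int) 0 = f (d[j]'h) := by
  rw [PySem.List.pyGetD_natCast, List.getD_append _ _ _ _ (by simpa using h),
    List.getD_eq_getElem _ _ (by simpa using h), List.getElem_map]

theorem pvSetD_map {f : (Int × Int) → Int} (d : List (Int × Int))
    (j : Nat) (v : Int) :
    PySem.List.pySetD (d.map f) (j : Int) v = (d.map f).set j v := by
  rw [PySem.List.pySetD_natCast]

theorem pvSetD_map_append {f : (Int × Int) → Int} (d : List (Int × Int)) (r : List Int)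
    (j : Nat) (h : j < d.length) (v : Int) :
    PySem.List.pySetD (d.map f ++ r) (j : Int) v = (d.map f).set j v ++ r := by
  rw [PySem.List.pySetD_natCast, List.set_append, if_pos (by simpa using h)]

-- A's inner step, seen through the simulation map
theorem pvStepA_T (l2 : List Int) (d : List (Int × Int)) (i : Nat) (h : i + 1 < d.length) :
    pvStepA (pvT l2 d) (i : Int) = pvT l2 (pvStepD d i) := by
  have hi : i < d.length := by omega
  have hcast : (i : Int) + 1 = ((i + 1 : Nat) : Int) := by push_cast; ring
  unfold pvStepA pvT
  simp only [hcast]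
  rw [pvGetD_map d i hi, pvGetD_map d (i + 1) h]
  unfold pvStepD
  rw [dif_pos h]
  by_cases hcond : (d[i + 1]'h).2 < (d[i]'hi).2
  · rw [if_pos hcond, if_pos hcond]
    rw [pvGetD_map_append d _ i hi,
      pvSetD_map d i, pvSetD_map_append d _ i hi,
      pvGetD_map_append d _ (i + 1) h]
    simp only [PySem.List.pySetD_natCast, List.set_append, List.map_set, List.length_set,
      List.length_map, if_pos (by simpa using h)]
  · rw [if_neg hcond, if_neg hcond]
theorem pvPassB_length (m : Nat) (d : List (Int × Int)) : (pvPassB m d).length = d.length := by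
  rw [← pvInnerN_eq_passB]; exact pvInnerN_length m d

theorem pvInner_T (l2 : List Int) (d : List (Int × Int)) (m : Nat) (h : m < d.length) :
    (PySem.List.pyRange 0 (m : Int) 1).foldl pvStepA (pvT l2 d) = pvT l2 (pvInnerN m d) := by
  have aux : ∀ m', m' < d.length →
      (List.range m').foldl (fun st (k : Nat) => pvStepA st (k : Int)) (pvT l2 d) = pvT l2 (pvInnerN m' d) := by
    intro m'
    induction m' with
    | zero => intro _; rfl
    | succ m' ih =>
      intro hm
      rw [List.range_succ, List.foldl_append, List.foldl_cons, List.foldl_nil, ih (by omega)]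
      rw [pvStepA_T l2 (pvInnerN m' d) m' (by rw [pvInnerN_length]; omega)]
      show pvT l2 (pvStepD (pvInnerN m' d) m') = pvT l2 (pvInnerN (m' + 1) d)
      unfold pvInnerN
      rw [List.range_succ, List.foldl_append, List.foldl_cons, List.foldl_nil]
  rw [PySem.List.pyRange_zero_nat m, List.foldl_map]
  exact aux m h

theorem pvRange_desc (m : Nat) :
    PySem.List.pyRange (m : Int) 0 (-1) = (List.range m).map (fun (k : Nat) => ((m : Int) - (k : Int))) := by
  unfold PySem.List.pyRange
  rw [if_neg (by norm_num)]
  rcases Nat.eq_zero_or_pos m with h | h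
  · subst h; simp
  · rw [if_neg (by norm_num), if_pos (by exact_mod_cast h)]
    show List.map _ (List.range (((m : Int) - 0 + -(-1) - 1) / -(-1)).toNat) = _
    have hq : (((m : Int) - 0 + -(-1) - 1) / -(-1)).toNat = m := by norm_num
    rw [hq]
    apply List.map_congr_left
    intro k _
    ring

theorem pvDesc_succ (m : Nat) :
    (List.range (m + 1)).map (fun (k : Nat) => (((m : Nat) + 1 : Int) - (k : Int)))
      = ((m : Nat) + 1 : Int) :: (List.range m).map (fun (k : Nat) => ((m : Int) - (k : Int))) := by
  rw [List.range_succ_eq_map, List.map_cons, List.map_map]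
  refine congrArg₂ List.cons (by norm_num) ?_
  apply List.map_congr_left
  intro k _
  simp only [Function.comp_apply, Nat.succ_eq_add_one]
  push_cast
  ring

theorem pvOuter_T (l2 : List Int) (m : Nat) (d : List (Int × Int)) (h : m < d.length) :
    ((List.range m).map (fun (k : Nat) => ((m : Int) - (k : Int)))).foldl
      (fun st numPasada => (PySem.List.pyRange 0 numPasada 1).foldl pvStepA st) (pvT l2 d)
    = pvT l2 (pvBub m d) := by
  induction m generalizing d with
  | zero => simp [pvBub]
  | succ m ih =>
    have hc : ((m + 1 : Nat) : Int) = ((m : Nat) : Int) + 1 := by push_cast; ring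
    rw [show ((List.range (m + 1)).map (fun (k : Nat) => (((m + 1 : Nat) : Int)) - (k : Int)))
        = (((m : Nat) + 1 : Int)) :: (List.range m).map (fun (k : Nat) => ((m : Int) - (k : Int))) by
      rw [← pvDesc_succ]; apply List.map_congr_left; intro k _; rw [hc]]
    rw [List.foldl_cons]
    have h1 : ((m : Nat) + 1 : Int) = (((m + 1 : Nat)) : Int) := by push_cast; ring
    rw [h1, pvInner_T l2 d (m + 1) h, pvInnerN_eq_passB]
    rw [ih (pvPassB (m + 1) d) (by rw [pvPassB_length]; omega)]
    show pvT l2 (pvBub m (pvPassB (m + 1) d)) = pvT l2 (pvBub (m + 1) d)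
    simp [pvBub]

theorem pvT_enumerate (l1 l2 : List Int) (h : l1.length ≤ l2.length) :
    pvT l2 (PySem.List.enumerate l1 0) = (l1, l2) := by
  unfold pvT
  rw [PySem.List.map_snd_enumerate]
  have hlen : (PySem.List.enumerate l1 0).length = l1.length := PySem.List.length_enumerate l1 0
  rw [hlen]
  have hmap : (PySem.List.enumerate l1 0).map (fun t => PySem.List.pyGetD l2 t.1 0)
      = l2.take l1.length := by
    apply List.ext_getElem
    · simp [hlen]; omega
    · intro i h1 h2
      rw [List.getElem_map, List.getElem_take]
      have hi : i < l1.length := by simpa [hlen] using h1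
      rw [PySem.List.getElem_enumerate]
      simp only [zero_add]
      rw [PySem.List.pyGetD_natCast, List.getD_eq_getElem _ _ (by omega)]
  rw [hmap, List.take_append_drop]

theorem pvDec_eq_bub (l1 : List Int) :
    PySem.List.sorted (PySem.List.enumerate l1 0) pvKey false
      = pvBub (l1.length - 1) (PySem.List.enumerate l1 0) := by
  have hlen : (PySem.List.enumerate l1 0).length = l1.length := PySem.List.length_enumerate l1 0
  have hnil : (PySem.List.enumerate l1 0).drop ((l1.length - 1) + 1) = [] := by
    apply List.drop_eq_nil_of_le
    rw [hlen]; omega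
  have hS : (PySem.List.enumerate l1 0).Pairwise pvS := by
    refine (PySem.List.pairwise_lt_enumerate l1 0).imp ?_
    intro a b hab
    exact fun _ => hab
  obtain ⟨hperm, hpw⟩ := pvBub_inv (l1.length - 1) (PySem.List.enumerate l1 0) hS
    (by rw [hnil]; intro a _ b hb; simp at hb) (by rw [hnil]; simp)
  exact PySem.List.sorted_eq_of_perm_of_pairwise_lt _ _ pvKey hperm hpw

-- ===== VERDICT (by name: the statement is the Claim_ definition above) =====
theorem siralama_yap_spec : Claim_equal_siralama_yap := by
  intro l1 l2 _ hpre
  unfold Spec_siralama_yap Pre_siralama_yap at *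
  simp only [siralama_yap, siralama_yap_alt]
  have hdec : PySem.List.sorted (PySem.List.enumerate l1 0) (fun t => toLex (t.2, t.1)) false
      = pvBub (l1.length - 1) (PySem.List.enumerate l1 0) := pvDec_eq_bub l1
  have hlen : (PySem.List.enumerate l1 0).length = l1.length := PySem.List.length_enumerate l1 0
  have hdlen : (pvBub (l1.length - 1) (PySem.List.enumerate l1 0)).length = l1.length := by
    rw [← hdec, PySem.List.length_sorted, hlen]
  rw [hdec, PySem.List.slice_from_natCast]
  rcases Nat.eq_zero_or_pos l1.length with h0 | hpos
  · have : l1 = [] := List.length_eq_zero_iff.mp h0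
    subst this
    show (PySem.List.pyRange (-1) 0 (-1)).foldl _ ([], l2) = _
    rw [show PySem.List.pyRange (-1) 0 (-1) = [] by rfl]
    simp [pvBub, PySem.List.enumerate]
  · have hcast : ((l1.length : Int) - 1) = ((l1.length - 1 : Nat) : Int) := by
      push_cast [hpos]; omega
    rw [hcast, pvRange_desc (l1.length - 1)]
    have := pvOuter_T l2 (l1.length - 1) (PySem.List.enumerate l1 0) (by rw [hlen]; omega)
    rw [pvT_enumerate l1 l2 hpre] at this
    rw [this]
    unfold pvT
    rw [hdlen]
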